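-- pv_equiv track=rewrite | github.com/Bhubanghimire/Python-code-assignment | double_trouble.py | double_trouble
-- ===== SOURCE A (Python) =====
-- def double_trouble(items, n):
--     item = ""
--     count=0
--
--     for i in range(1,n+1):
--         item = items[0]
--         items.remove(items[0])
--         items.append(item)
--         items.append(item)
--     item = items[0]
--     return item
-- ===== SOURCE B (Python) =====
-- def double_trouble(items, n):
--     # O(log n) index mapping instead of simulating the queue; does not mutate items
--     # (equivalence to A is about the return value only).
--     L = len(items)
--     p = n if n > 0 else 0
--     while p >= L:
--         p = (p - L) // 2
--     return items[p]
-- ===== Notes on version B (the rewrite author's own statement) =====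
-- stated objective: faster
-- what changed: B replaces A's step-by-step queue simulation (pop front, append it twice, n times over a growing list) by a recursive index mapping: position p of the virtual stream is original items[p] if p < L, else the element popped at step (p-L)//2, so a short while-loop halves the index instead of mutating the list.
import Mathlib
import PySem

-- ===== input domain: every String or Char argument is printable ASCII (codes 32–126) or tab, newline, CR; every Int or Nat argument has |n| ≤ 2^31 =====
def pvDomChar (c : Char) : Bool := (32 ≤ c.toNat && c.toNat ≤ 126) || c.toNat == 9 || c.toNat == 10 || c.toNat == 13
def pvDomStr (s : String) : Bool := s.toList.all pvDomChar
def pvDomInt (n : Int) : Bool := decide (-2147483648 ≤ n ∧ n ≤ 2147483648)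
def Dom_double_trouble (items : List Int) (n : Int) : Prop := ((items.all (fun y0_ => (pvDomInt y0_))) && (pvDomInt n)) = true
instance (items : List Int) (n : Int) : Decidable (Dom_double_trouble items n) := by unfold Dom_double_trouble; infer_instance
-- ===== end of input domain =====

-- B replaces A's O(n·(L+n)) queue simulation by an O(log n) index mapping on the
-- unchanged input list (A mutates `items` in place; B does not — the equivalence
-- proved here is about the return value only).

-- ===== PORT A =====
-- one body of A's for-loop: item = items[0]; items.remove(items[0]); items.append(item); items.append(item)
def aStep (st : Option (List Int)) (_i : Int) : Option (List Int) :=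
  match st with
  | none => none
  | some its =>
    match PySem.List.pyGet? its 0 with
    | none => none                     -- IndexError: excluded by Pre_
    | some item =>
      match PySem.List.remove? its item with
      | none => none                   -- ValueError: unreachable (item came from its)
      | some its' => some (its' ++ [item] ++ [item])

def double_trouble (items : List Int) (n : Int) : Int :=
  match (PySem.List.pyRange 1 (n + 1) 1).foldl aStep (some items) with
  | some its => (PySem.List.pyGet? its 0).getD 0   -- final item = items[0]; none (IndexError) excluded by Pre_
  | none => 0                                       -- a raise inside the loop: excluded by Pre_

-- ===== PORT B =====
-- B's while loop: while p >= L: p = (p - L) // 2   (all quantities are nonnegative)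
def altLoop (L p : Nat) : Nat :=
  if _h : 0 < L ∧ L ≤ p then altLoop L ((p - L) / 2) else p
  termination_by p
  decreasing_by omega

def double_trouble_alt (items : List Int) (n : Int) : Int :=
  let L := items.length
  let p : Nat := if 0 < n then n.toNat else 0
  items.getD (altLoop L p) 0   -- items[p]; altLoop keeps p < L whenever L > 0

-- ===== PRECONDITION & SPEC =====
-- Pre_ excludes only the empty list, on which Python A raises IndexError.
def Pre_double_trouble (items : List Int) (n : Int) : Prop := items ≠ []
instance (items : List Int) (n : Int) : Decidable (Pre_double_trouble items n) := by
  unfold Pre_double_trouble; infer_instance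

def pvWitness_double_trouble : List Int × Int := ([1, 2], 3)

def Spec_double_trouble (items : List Int) (n : Int) (out : Int) : Prop := out = double_trouble_alt items n
instance (items : List Int) (n : Int) (out : Int) : Decidable (Spec_double_trouble items n out) := by unfold Spec_double_trouble; infer_instance

-- ===== CLAIM (what is proved, stated in full; the proofs are below) =====
def Claim_equal_double_trouble : Prop := ∀ (items : List Int) (n : Int), Dom_double_trouble items n → Pre_double_trouble items n → Spec_double_trouble items n (double_trouble items n)

-- ===== LEMMAS AND PROOFS =====

lemma altLoop_of_lt {L p : Nat} (h : ¬ (0 < L ∧ L ≤ p)) : altLoop L p = p := by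
  rw [altLoop]; simp [h]

lemma altLoop_of_ge {L p : Nat} (h0 : 0 < L) (h : L ≤ p) :
    altLoop L p = altLoop L ((p - L) / 2) := by
  rw [altLoop]; simp [h0, h]

lemma altLoop_dup_left {L k : Nat} (h0 : 0 < L) :
    altLoop L (L + 2 * k) = altLoop L k := by
  rw [altLoop_of_ge h0 (by omega)]
  congr 1; omega

lemma altLoop_dup_right {L k : Nat} (h0 : 0 < L) :
    altLoop L (L + 2 * k + 1) = altLoop L k := by
  rw [altLoop_of_ge h0 (by omega)]
  congr 1; omega

-- k applications of A's loop body
def stepK : Nat → Option (List Int) → Option (List Int)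
  | 0, st => st
  | k + 1, st => aStep (stepK k st) 0

lemma aStep_arg (st : Option (List Int)) (a b : Int) : aStep st a = aStep st b := by
  cases st <;> rfl

lemma stepK_comm (k : Nat) (st : Option (List Int)) (a : Int) :
    stepK k (aStep st a) = aStep (stepK k st) a := by
  induction k generalizing st with
  | zero => rfl
  | succ k ih => simp only [stepK, ih, aStep_arg _ 0 a]

lemma foldl_aStep (l : List Int) (st : Option (List Int)) :
    l.foldl aStep st = stepK l.length st := by
  induction l generalizing st with
  | nil => rfl
  | cons a l ih =>
      simp only [List.foldl_cons, List.length_cons, stepK, ih, stepK_comm,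
        aStep_arg _ a 0]

-- the invariant: after k steps the queue holds positions k, k+1, …, k+L+k-1 of
-- the virtual stream, whose value at p is items[altLoop L p]
lemma stepK_invariant (items : List Int) (h : items ≠ []) (k : Nat) :
    ∃ s : List Int, stepK k (some items) = some s ∧
      s.length = items.length + k ∧
      ∀ j : Nat, j < s.length →
        s.getD j 0 = items.getD (altLoop items.length (k + j)) 0 := by
  have hL : 0 < items.length := List.length_pos_iff.mpr h
  induction k with
  | zero =>
      refine ⟨items, rfl, by omega, ?_⟩
      intro j hj
      rw [altLoop_of_lt (by omega)]; simp
  | succ k ih =>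
      obtain ⟨s, hs, hlen, hval⟩ := ih
      obtain ⟨x, xs, rfl⟩ : ∃ x xs, s = x :: xs := by
        cases s with
        | nil => simp at hlen; omega
        | cons x xs => exact ⟨x, xs, rfl⟩
      have hx : x = items.getD (altLoop items.length k) 0 := by
        have := hval 0 (by simp)
        simpa using this
      refine ⟨xs ++ [x] ++ [x], ?_, ?_, ?_⟩
      · simp only [stepK, hs, aStep, PySem.List.pyGet?_zero_cons,
          PySem.List.remove?_cons_self]
      · simp at hlen ⊢; omega
      · intro j hj
        simp only [List.length_append, List.length_cons, List.length_nil] at hj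
        have hxs : xs.length = items.length + k - 1 := by
          simp at hlen; omega
        by_cases hjlt : j < xs.length
        · have : (xs ++ [x] ++ [x]).getD j 0 = xs.getD j 0 := by
            rw [List.append_assoc, List.getD_append _ _ _ _ hjlt]
          rw [this]
          have := hval (j + 1) (by simp; omega)
          simp only [List.getD_cons_succ] at this
          rw [this]
          congr 2; omega
        · have hlist : xs ++ [x] ++ [x] = xs ++ [x, x] := by simp
          rw [hlist, List.getD_append_right _ _ _ _ (by omega), hx]
          rcases (by omega : j = xs.length ∨ j = xs.length + 1) with rfl | rfl
          · rw [Nat.sub_self, List.getD_cons_zero]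
            congr 1
            have h2 : k + 1 + xs.length = items.length + 2 * k := by omega
            rw [h2, altLoop_dup_left hL]
          · rw [Nat.add_sub_cancel_left, List.getD_cons_succ, List.getD_cons_zero]
            congr 1
            have h2 : k + 1 + (xs.length + 1) = items.length + 2 * k + 1 := by omega
            rw [h2, altLoop_dup_right hL]

lemma toNat_if (n : Int) : (if 0 < n then n.toNat else 0) = n.toNat := by
  split <;> omega

-- ===== VERDICT (by name: the statement is the Claim_ definition above) =====
theorem double_trouble_spec : Claim_equal_double_trouble := by
  intro items n _hdom hpre
  unfold Spec_double_trouble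
  have hL : 0 < items.length := List.length_pos_iff.mpr hpre
  obtain ⟨s, hs, hlen, hval⟩ := stepK_invariant items hpre n.toNat
  have hrange : (PySem.List.pyRange 1 (n + 1) 1).length = n.toNat := by
    rw [PySem.List.length_pyRange_one]; omega
  unfold double_trouble
  rw [foldl_aStep, hrange, hs]
  obtain ⟨y, ys, rfl⟩ : ∃ y ys, s = y :: ys := by
    cases s with
    | nil => simp at hlen; omega
    | cons y ys => exact ⟨y, ys, rfl⟩
  have h0 := hval 0 (by simp)
  simp only [List.getD_cons_zero] at h0
  simp only [PySem.List.pyGet?_zero_cons, Option.getD_some, h0]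
  unfold double_trouble_alt
  simp only [toNat_if, Nat.add_zero]
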